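-- pv_equiv track=rewrite | github.com/T0ha/ezodf | ezodf/tableutils.py | iter_cell_range
-- ===== SOURCE A (Python) =====
-- def iter_cell_range(pos, size):
--     start_row, start_column = pos
--     if (start_row < 0) or (start_column < 0):
--         raise ValueError("invalid start pos: %s" % str(pos))
--     nrows, ncolumns = size
--     if (nrows < 1) or (ncolumns < 1):
--         raise ValueError("invalid size: %s" % str(size))
--
--     for row in range(start_row, start_row + nrows):
--         for column in range(start_column, start_column + ncolumns):
--             yield (row, column)
-- ===== SOURCE B (Python) =====
-- def iter_cell_range(pos, size):
--     start_row, start_column = pos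
--     if (start_row < 0) or (start_column < 0):
--         raise ValueError("invalid start pos: %s" % str(pos))
--     nrows, ncolumns = size
--     if (nrows < 1) or (ncolumns < 1):
--         raise ValueError("invalid size: %s" % str(size))
--     end_column = start_column + ncolumns
--     remaining = nrows * ncolumns
--     row, column = start_row, start_column
--     while remaining:
--         yield (row, column)
--         remaining -= 1
--         if column + 1 == end_column:
--             row, column = row + 1, start_column
--         else:
--             column += 1
-- ===== Notes on version B (the rewrite author's own statement) =====
-- stated objective: alternative
-- what changed: Replaces the two nested range loops with a single odometer-style while loop that counts remaining cells down from nrows*ncolumns and carries the column into the next row when it hits the row end.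
import Mathlib
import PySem

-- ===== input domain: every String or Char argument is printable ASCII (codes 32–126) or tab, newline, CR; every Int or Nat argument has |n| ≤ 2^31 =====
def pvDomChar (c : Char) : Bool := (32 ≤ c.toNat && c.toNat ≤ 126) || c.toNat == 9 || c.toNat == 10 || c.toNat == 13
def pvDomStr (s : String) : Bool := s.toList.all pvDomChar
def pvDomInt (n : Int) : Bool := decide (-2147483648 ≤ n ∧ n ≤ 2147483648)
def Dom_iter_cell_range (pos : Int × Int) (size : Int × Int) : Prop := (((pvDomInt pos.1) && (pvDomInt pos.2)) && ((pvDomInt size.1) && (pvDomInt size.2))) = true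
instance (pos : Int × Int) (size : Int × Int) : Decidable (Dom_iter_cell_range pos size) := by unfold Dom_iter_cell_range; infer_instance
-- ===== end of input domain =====

-- B replaces A's two nested range loops by a single odometer-style while loop that counts
-- remaining cells down from nrows*ncolumns, carrying the column into the next row at the
-- row end; same row-major sequence, same cost (objective: alternative).

-- ===== PORT A =====
-- nested loops: for row in range(sr, sr+nrows): for column in range(sc, sc+ncolumns): yield (row, column)
def iter_cell_range (pos : Int × Int) (size : Int × Int) : List (Int × Int) :=
  (PySem.List.pyRange pos.1 (pos.1 + size.1) 1).flatMap (fun row =>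
    (PySem.List.pyRange pos.2 (pos.2 + size.2) 1).map (fun column => (row, column)))

-- ===== PORT B =====
-- the while loop: 'while remaining: yield (row, column); remaining -= 1;
--   if column + 1 == end_column: row, column = row + 1, start_column  else: column += 1'
-- 'remaining' is the Nat fuel (remaining = nrows*ncolumns ≥ 0 whenever the guards pass).
def pvOdometer (start_column end_column : Int) : Nat → Int → Int → List (Int × Int)
  | 0, _, _ => []
  | remaining + 1, row, column =>
      (row, column) ::
        (if column + 1 == end_column then
          pvOdometer start_column end_column remaining (row + 1) start_column
        else
          pvOdometer start_column end_column remaining row (column + 1))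

def iter_cell_range_alt (pos : Int × Int) (size : Int × Int) : List (Int × Int) :=
  pvOdometer pos.2 (pos.2 + size.2) (size.1 * size.2).toNat pos.1 pos.2

-- ===== PRECONDITION & SPEC =====
-- Pre_ excludes exactly the inputs on which A raises ValueError (negative start or size < 1).
def Pre_iter_cell_range (pos : Int × Int) (size : Int × Int) : Prop :=
  0 ≤ pos.1 ∧ 0 ≤ pos.2 ∧ 1 ≤ size.1 ∧ 1 ≤ size.2
instance (pos : Int × Int) (size : Int × Int) : Decidable (Pre_iter_cell_range pos size) := by
  unfold Pre_iter_cell_range; infer_instance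
def pvWitness_iter_cell_range : (Int × Int) × (Int × Int) := ((1, 2), (2, 3))

def Spec_iter_cell_range (pos : Int × Int) (size : Int × Int) (out : List (Int × Int)) : Prop := out = iter_cell_range_alt pos size
instance (pos : Int × Int) (size : Int × Int) (out : List (Int × Int)) : Decidable (Spec_iter_cell_range pos size out) := by unfold Spec_iter_cell_range; infer_instance

-- ===== CLAIM (what is proved, stated in full; the proofs are below) =====
def Claim_equal_iter_cell_range : Prop := ∀ (pos : Int × Int) (size : Int × Int), Dom_iter_cell_range pos size → Pre_iter_cell_range pos size → Spec_iter_cell_range pos size (iter_cell_range pos size)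

-- ===== LEMMAS AND PROOFS =====

-- one full sweep of the column odometer emits one row and carries into the next row
theorem pv_row (sc ec : Int) : ∀ (j k : Nat) (row col : Int), 1 ≤ j → col + (j : Int) = ec →
    pvOdometer sc ec (j + k) row col =
      ((List.range j).map (fun (c : Nat) => (row, col + (c : Int)))) ++ pvOdometer sc ec k (row + 1) sc := by
  intro j
  induction j with
  | zero => intro k row col h; omega
  | succ j ih =>
    intro k row col _ hcol
    by_cases hj : j = 0
    · subst hj
      have h1 : (col + 1 == ec) = true := by
        simp only [beq_iff_eq]; push_cast at hcol; omega
      rw [show 1 + k = k + 1 by omega]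
      simp [pvOdometer, h1]
    · have hne : (col + 1 == ec) = false := by
        simp only [beq_eq_false_iff_ne, ne_eq]; push_cast at hcol; omega
      rw [show j + 1 + k = (j + k) + 1 by omega]
      simp only [pvOdometer, hne, Bool.false_eq_true, if_false]
      rw [ih k row (col + 1) (by omega) (by push_cast at hcol ⊢; omega)]
      rw [List.range_succ_eq_map]
      simp only [List.map_cons, List.map_map, List.cons_append, Nat.cast_zero, add_zero]
      congr 2
      refine List.map_congr_left ?_
      intro c _
      simp only [Function.comp_apply, Nat.succ_eq_add_one]
      congr 1
      push_cast
      ring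

-- the full odometer run equals the nested row-major enumeration
theorem pv_grid (sc : Int) (n : Nat) (hn : 1 ≤ n) : ∀ (m : Nat) (row : Int),
    pvOdometer sc (sc + (n : Int)) (m * n) row sc =
      (List.range m).flatMap (fun (r : Nat) => (List.range n).map (fun (c : Nat) => (row + (r : Int), sc + (c : Int)))) := by
  intro m
  induction m with
  | zero => intro row; simp [pvOdometer]
  | succ m ih =>
    intro row
    rw [show (m + 1) * n = n + m * n by ring,
        pv_row sc (sc + (n : Int)) n (m * n) row sc hn rfl, ih (row + 1),
        List.range_succ_eq_map, List.flatMap_cons, List.flatMap_map]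
    congr 1
    · simp
    · refine List.flatMap_congr ?_
      intro r _
      refine List.map_congr_left ?_
      intro c _
      congr 1
      push_cast
      ring

theorem iter_cell_range_eq (pos size : Int × Int)
    (h : Pre_iter_cell_range pos size) :
    iter_cell_range pos size = iter_cell_range_alt pos size := by
  obtain ⟨hr, hc, hm, hn⟩ := h
  obtain ⟨sr, sc⟩ := pos
  obtain ⟨nr, nc⟩ := size
  simp only at hr hc hm hn
  have h3 : (nr * nc).toNat = nr.toNat * nc.toNat := by
    rw [Int.toNat_mul (by omega) (by omega)]
  unfold iter_cell_range iter_cell_range_alt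
  simp only [PySem.List.pyRange_one]
  have h1 : (sr + nr - sr).toNat = nr.toNat := by omega
  have h2 : (sc + nc - sc).toNat = nc.toNat := by omega
  rw [h1, h2, h3]
  rw [show sc + nc = sc + (nc.toNat : Int) by omega]
  rw [pv_grid sc nc.toNat (by omega) nr.toNat sr]
  rw [List.flatMap_map]
  congr 1
  funext r
  rw [List.map_map]
  rfl

-- ===== VERDICT (by name: the statement is the Claim_ definition above) =====
theorem iter_cell_range_spec : Claim_equal_iter_cell_range := by
  intro pos size _ hpre
  exact iter_cell_range_eq pos size hpre
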